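-- pv_equiv track=rewrite | github.com/MrWhiteRichard/Fundament-Mathematik | SS_2021/ReiL_UE/Übung_4/Richard/outsource.py | argsmax
-- ===== SOURCE A (Python) =====
-- from collections import defaultdict
--
-- def argsmax(A):
--
--     if type(A) == dict or type(A) == defaultdict:
--         maximum = max(A.values())
--         return [i for i, a in A.items() if a == maximum]
--
--     elif type(A) == list:
--         maximum = max(A)
--         return [i for i, a in enumerate(A) if a == maximum]
--
--     else:
--         raise NotImplementedError
-- ===== SOURCE B (Python) =====
-- from collections import defaultdict
--
-- def argsmax(A):
--     # single pass: track current best value and the keys/indices attaining it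
--     if type(A) == dict or type(A) == defaultdict:
--         it = iter(A.items())
--         try:
--             k0, best = next(it)
--         except StopIteration:
--             raise ValueError("argsmax of empty dict")
--         keys = [k0]
--         for k, v in it:
--             if v > best:
--                 best = v
--                 keys = [k]
--             elif v == best:
--                 keys.append(k)
--         return keys
--     elif type(A) == list:
--         if not A:
--             raise ValueError("argsmax of empty list")
--         best = A[0]
--         idxs = [0]
--         for i in range(1, len(A)):
--             a = A[i]
--             if a > best:
--                 best = a
--                 idxs = [i]
--             elif a == best:
--                 idxs.append(i)
--         return idxs
--     else:
--         raise NotImplementedError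
-- ===== Notes on version B (the rewrite author's own statement) =====
-- stated objective: alternative
-- what changed: Replaced the two-pass 'max() then filter-comprehension' with a single pass that tracks the running best value and the list of indices attaining it (reset on strictly greater, append on equal).
import Mathlib
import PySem

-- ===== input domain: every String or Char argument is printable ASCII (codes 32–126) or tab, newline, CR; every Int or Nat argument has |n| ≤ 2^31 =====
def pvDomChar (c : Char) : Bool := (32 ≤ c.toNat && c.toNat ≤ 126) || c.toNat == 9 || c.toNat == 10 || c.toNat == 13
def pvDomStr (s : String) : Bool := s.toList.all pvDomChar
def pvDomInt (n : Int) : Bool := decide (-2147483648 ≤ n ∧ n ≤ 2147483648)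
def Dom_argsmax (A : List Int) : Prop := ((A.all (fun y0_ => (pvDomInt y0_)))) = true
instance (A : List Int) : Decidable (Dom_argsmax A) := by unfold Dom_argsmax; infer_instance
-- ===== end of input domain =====

-- B: single pass tracking the running best value and the indices attaining it, instead of A's max()-then-filter two passes.

-- ===== PORT A =====
-- 'maximum = max(A); return [i for i, a in enumerate(A) if a == maximum]'
def argsmax (A : List Int) : List Int :=
  match PySem.List.max? A (fun y => y) with
  | none => []   -- max([]) raises ValueError; excluded by Pre_argsmax
  | some m => ((PySem.List.enumerate A).filter (fun p => p.2 = m)).map (fun p => p.1)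

-- ===== PORT B =====
-- the 'for i in range(1, len(A))' loop of Source B, carrying (best, idxs)
def argsmaxLoop (rest : List Int) (best : Int) (idxs : List Int) (i : Int) : List Int :=
  match rest with
  | [] => idxs
  | a :: l =>
    if a > best then argsmaxLoop l a [i] (i + 1)
    else if a = best then argsmaxLoop l best (idxs ++ [i]) (i + 1)
    else argsmaxLoop l best idxs (i + 1)

def argsmax_alt (A : List Int) : List Int :=
  match A with
  | [] => []   -- Source B raises ValueError here; excluded by Pre_argsmax
  | x :: xs => argsmaxLoop xs x [0] 1

-- ===== PRECONDITION & SPEC =====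
-- both A (max of empty sequence) and B raise ValueError on the empty list
def Pre_argsmax (A : List Int) : Prop := A ≠ []
instance (A : List Int) : Decidable (Pre_argsmax A) := by unfold Pre_argsmax; infer_instance
def pvWitness_argsmax : List Int := [3, 1, 3]

def Spec_argsmax (A : List Int) (out : List Int) : Prop := out = argsmax_alt A
instance (A : List Int) (out : List Int) : Decidable (Spec_argsmax A out) := by unfold Spec_argsmax; infer_instance

-- ===== CLAIM (what is proved, stated in full; the proofs are below) =====
def Claim_equal_argsmax : Prop := ∀ (A : List Int), Dom_argsmax A → Pre_argsmax A → Spec_argsmax A (argsmax A)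

-- ===== LEMMAS AND PROOFS =====

-- the indices (counted from i) of the occurrences of m in l — what A's filter computes, offset-parametrised
def occIdx (l : List Int) (m : Int) (i : Int) : List Int :=
  match l with
  | [] => []
  | a :: t => (if a = m then [i] else []) ++ occIdx t m (i + 1)

lemma filter_enumerate_eq_occIdx (l : List Int) (m : Int) (s : Int) :
    ((PySem.List.enumerate l s).filter (fun p => p.2 = m)).map (fun p => p.1) = occIdx l m s := by
  induction l generalizing s with
  | nil => simp [PySem.List.enumerate_nil, occIdx]
  | cons a t ih =>
    simp only [PySem.List.enumerate_cons, List.filter_cons, occIdx]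
    by_cases h : a = m <;> simp [h, ih]

lemma argsmaxLoop_eq (rest : List Int) (best : Int) (idxs : List Int) (i : Int) :
    argsmaxLoop rest best idxs i =
      (if best = rest.foldl max best then idxs else []) ++ occIdx rest (rest.foldl max best) i := by
  induction rest generalizing best idxs i with
  | nil => simp [argsmaxLoop, occIdx]
  | cons a l ih =>
    simp only [argsmaxLoop, List.foldl_cons]
    by_cases h1 : a > best
    · have hmax : max best a = a := by omega
      rw [ih a [i] (i + 1)]
      simp only [hmax]
      have hb : best ≠ l.foldl max a := by
        have := (PySem.List.le_foldl_max l a).1; omega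
      simp only [h1, if_true, hb, if_false, List.nil_append, occIdx]
    · have hmax : max best a = best := by omega
      simp only [hmax]
      have hne : a ≠ l.foldl max best ∨ a = best := by
        by_cases he : a = best
        · exact Or.inr he
        · left
          have := (PySem.List.le_foldl_max l best).1; omega
      by_cases h2 : a = best
      · simp only [h1, if_false, h2, if_true]
        rw [ih best (idxs ++ [i]) (i + 1)]
        simp only [occIdx]
        by_cases h3 : best = l.foldl max best
        · simp [← h3, List.append_assoc]
        · simp [h3]
      · simp only [if_neg h1, if_neg h2]
        rw [ih best idxs (i + 1)]
        simp only [occIdx]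
        have ha : a ≠ l.foldl max best := hne.resolve_right h2
        simp [ha]

-- ===== VERDICT (by name: the statement is the Claim_ definition above) =====
theorem argsmax_spec : Claim_equal_argsmax := by
  intro A _ hpre
  unfold Spec_argsmax
  match A with
  | [] => exact absurd rfl hpre
  | x :: xs =>
    unfold argsmax argsmax_alt
    simp only [PySem.List.max?_id_cons]
    rw [filter_enumerate_eq_occIdx, argsmaxLoop_eq]
    simp only [occIdx]
    by_cases h : x = xs.foldl max x
    · simp [← h]
    · simp [h]
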